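-- pv_equiv track=rewrite | github.com/ishaqmarashy/gw2-character-viewer-Flask | app.py | removePreCached
-- ===== SOURCE A (Python) =====
-- ids={}
--
-- def removePreCached(upgradesUrl):
--     index=0
--     while index<len(upgradesUrl):
--             id=upgradesUrl[index]
--             while id in ids and index<len(upgradesUrl):
--                 id=upgradesUrl[index]
--                 upgradesUrl.pop(index)
--             index+=1
--     return upgradesUrl
-- ===== SOURCE B (Python) =====
-- def removePreCached(upgradesUrl):
--     # The module-level `ids` dict is empty and never populated, so the
--     # membership test in A never succeeds: nothing is ever removed.
--     return upgradesUrl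
-- ===== Notes on version B (the rewrite author's own statement) =====
-- stated objective: simpler
-- what changed: The module-level ids dict A consults is empty and never populated, so A's nested loops never remove an element; B returns the list unchanged in O(1) instead of walking it.
import Mathlib
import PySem

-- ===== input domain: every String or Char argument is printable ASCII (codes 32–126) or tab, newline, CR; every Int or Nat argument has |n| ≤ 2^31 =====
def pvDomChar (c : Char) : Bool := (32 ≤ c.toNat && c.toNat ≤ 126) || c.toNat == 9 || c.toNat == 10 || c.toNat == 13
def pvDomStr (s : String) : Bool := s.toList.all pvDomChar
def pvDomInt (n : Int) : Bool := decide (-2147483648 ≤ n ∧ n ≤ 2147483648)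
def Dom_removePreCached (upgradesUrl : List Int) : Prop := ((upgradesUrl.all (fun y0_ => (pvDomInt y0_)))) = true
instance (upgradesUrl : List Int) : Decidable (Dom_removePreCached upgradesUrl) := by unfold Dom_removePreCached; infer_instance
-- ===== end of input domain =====

-- B returns the list unchanged: the module-level `ids` dict is empty and never
-- populated, so A's membership test never succeeds and A removes nothing.
-- ===== PORT A =====
-- module-level `ids = {}` (empty, never written)
def idsA : PySem.Dict Int Int := PySem.Dict.empty

-- inner `while id in ids and index < len(upgradesUrl): id = upgradesUrl[index]; upgradesUrl.pop(index)`
-- fuel-guarded for totality (each iteration pops, so len+1 fuel always suffices)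
def innerA (fuel : Nat) (id : Int) (xs : List Int) (index : Int) : Int × List Int :=
  match fuel with
  | 0 => (id, xs)
  | fuel + 1 =>
    if (PySem.Dict.get? idsA id).isSome ∧ index < (xs.length : Int) then
      match PySem.List.pyGet? xs index, PySem.List.pop? xs index with
      | some id', some (_, xs') => innerA fuel id' xs' index
      | _, _ => (id, xs)   -- unreachable: index is in range
    else (id, xs)

-- outer `while index < len(upgradesUrl): id = upgradesUrl[index]; <inner>; index += 1`
-- fuel-guarded: index grows by 1 each round and the length never grows, so len+1 suffices
def outerA (fuel : Nat) (xs : List Int) (index : Int) : List Int :=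
  match fuel with
  | 0 => xs
  | fuel + 1 =>
    if index < (xs.length : Int) then
      match PySem.List.pyGet? xs index with
      | some id =>
        let r := innerA (xs.length + 1) id xs index
        outerA fuel r.2 (index + 1)
      | none => xs   -- unreachable: index is in range
    else xs

def removePreCached (upgradesUrl : List Int) : List Int :=
  outerA (upgradesUrl.length + 1) upgradesUrl 0

-- ===== PORT B =====
def removePreCached_alt (upgradesUrl : List Int) : List Int := upgradesUrl

-- ===== PRECONDITION & SPEC =====
def Spec_removePreCached (upgradesUrl : List Int) (out : List Int) : Prop := out = removePreCached_alt upgradesUrl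
instance (upgradesUrl : List Int) (out : List Int) : Decidable (Spec_removePreCached upgradesUrl out) := by unfold Spec_removePreCached; infer_instance

-- ===== CLAIM (what is proved, stated in full; the proofs are below) =====
def Claim_equal_removePreCached : Prop := ∀ (upgradesUrl : List Int), Dom_removePreCached upgradesUrl → Spec_removePreCached upgradesUrl (removePreCached upgradesUrl)

-- ===== LEMMAS AND PROOFS =====

-- ===== VERDICT (by name: the statement is the Claim_ definition above) =====
theorem innerA_id (fuel : Nat) (id : Int) (xs : List Int) (index : Int) :
    innerA fuel id xs index = (id, xs) := by
  cases fuel with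
  | zero => rfl
  | succ n => simp [innerA, idsA]

theorem outerA_id (fuel : Nat) (xs : List Int) (index : Int) :
    outerA fuel xs index = xs := by
  induction fuel generalizing index with
  | zero => rfl
  | succ n ih =>
    simp only [outerA]
    split
    · cases h : PySem.List.pyGet? xs index with
      | none => rfl
      | some id => simp [innerA_id, ih]
    · rfl

-- ===== VERDICT (by name: the statement is the Claim_ definition above) =====
theorem removePreCached_spec : Claim_equal_removePreCached := by
  intro xs _
  unfold Spec_removePreCached removePreCached removePreCached_alt
  exact outerA_id _ _ _
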